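-- pv_equiv track=rewrite | github.com/gvarun20/TDDD95 | Exercise 8/dictionaryattack.py | get_unacceptable
-- ===== SOURCE A (Python) =====
-- def get_unacceptable(words: list[str]) -> list[set[str]]:
--     unacceptable = [set(words)]
--
--
--
--
--
--
--
--
--
--
--
--
--
--
--
--     for _ in range(3):
--         unacceptable_words = set()
--
--
--
--
--
--
--
--
--         for word in unacceptable[-1]:
--             for i in range(len(word) - 1):
--
--
--
--
--
--
--
--                 new_word = word[:i] + word[i + 1] + word[i] + word[i + 2:]
--
--
--
--
--
--                 if len(new_word) == len(word):
--                     unacceptable_words.add(new_word)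
--
--
--
--
--         unacceptable.append(unacceptable[-1].union(unacceptable_words))
--     return unacceptable
-- ===== SOURCE B (Python) =====
-- def get_unacceptable(words: list[str]) -> list[set[str]]:
--     # Recursive decomposition: each call returns the list of cumulative sets,
--     # building each round's additions as one set comprehension over adjacent
--     # character pairs instead of index loops with slicing and re-indexing.
--     def grow(cur, rounds):
--         if rounds == 0:
--             return [cur]
--         nxt = cur | {w[:i] + b + a + w[i + 2:]
--                      for w in cur
--                      for i, (a, b) in enumerate(zip(w, w[1:]))}
--         return [cur] + grow(nxt, rounds - 1)
--     return grow(set(words), 3)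
-- ===== Notes on version B (the rewrite author's own statement) =====
-- stated objective: simpler
-- what changed: B is a recursive decomposition that builds each round's swap additions as one set comprehension over enumerate(zip(w, w[1:])) pairs, replacing A's in-place list growth with unacceptable[-1] indexing, per-index ranges with double slicing/re-indexing and an always-true length guard.
import Mathlib
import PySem

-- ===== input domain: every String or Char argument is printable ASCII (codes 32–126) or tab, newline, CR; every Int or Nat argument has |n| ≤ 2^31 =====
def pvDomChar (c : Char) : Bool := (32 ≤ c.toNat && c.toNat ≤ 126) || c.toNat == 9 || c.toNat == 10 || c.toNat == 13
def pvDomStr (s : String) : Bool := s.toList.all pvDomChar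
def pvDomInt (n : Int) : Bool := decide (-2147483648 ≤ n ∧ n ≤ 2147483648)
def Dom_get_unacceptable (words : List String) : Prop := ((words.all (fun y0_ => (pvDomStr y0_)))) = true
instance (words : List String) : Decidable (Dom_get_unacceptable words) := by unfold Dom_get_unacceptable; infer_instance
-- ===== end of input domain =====

-- B is a recursive decomposition of the same closure computation: each round's swap set is
-- one flat comprehension over adjacent character pairs (enumerate+zip) instead of A's
-- in-place list growth with negative indexing, index ranges, slicing re-lookups and a length guard.


-- ===== PORT A =====
-- word[:i] + word[i + 1] + word[i] + word[i + 2:]  (ported on List Char; the indexed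
-- accesses use i from range(len(word)-1), so both pyGet? are always `some`)
def pvSwapA (word : String) (i : Int) : String :=
  String.ofList (PySem.List.slice word.toList none (some i) ++
    [(PySem.List.pyGet? word.toList (i + 1)).getD ' ',
     (PySem.List.pyGet? word.toList i).getD ' '] ++
    PySem.List.slice word.toList (some (i + 2)) none)

-- one iteration of A's `for _ in range(3)` body (`unacceptable[-1]` is never empty)
def pvStepA (unacceptable : List (List String)) (_ : Int) : List (List String) :=
  let last : PySem.Set String := (PySem.List.pyGet? unacceptable (-1)).getD []
  let unacceptable_words : PySem.Set String :=
    last.foldl (fun (uw : PySem.Set String) word =>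
      (PySem.List.pyRange 0 (PySem.Str.len word - 1)).foldl (fun (uw : PySem.Set String) i =>
        let new_word := pvSwapA word i
        if PySem.Str.len new_word == PySem.Str.len word then PySem.Set.add uw new_word
        else uw) uw) PySem.Set.empty
  unacceptable ++ [PySem.Set.union last unacceptable_words]

def get_unacceptable (words : List String) : List (List String) :=
  (PySem.List.pyRange 0 3).foldl pvStepA [PySem.Set.ofList words]

-- ===== PORT B =====
-- the comprehension element w[:i] + b + a + w[i + 2:] for (i, (a, b)) in enumerate(zip(w, w[1:]))
def pvSwapsB (w : String) : List String :=
  (PySem.List.enumerate (w.toList.zip (PySem.List.slice w.toList (some 1) none))).map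
    (fun p => String.ofList (PySem.List.slice w.toList none (some p.1) ++
      [p.2.2, p.2.1] ++ PySem.List.slice w.toList (some (p.1 + 2)) none))

-- grow(cur, rounds): [cur] for rounds = 0, else [cur] + grow(cur | {swaps}, rounds - 1)
def pvGrow (cur : PySem.Set String) (rounds : Nat) : List (List String) :=
  match rounds with
  | 0 => [cur]
  | Nat.succ n =>
    let nxt := PySem.Set.union cur (PySem.Set.ofList (cur.flatMap pvSwapsB))
    [cur] ++ pvGrow nxt n

def get_unacceptable_alt (words : List String) : List (List String) :=
  pvGrow (PySem.Set.ofList words) 3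

-- ===== PRECONDITION & SPEC =====
def Spec_get_unacceptable (words : List String) (out : List (List String)) : Prop := out = get_unacceptable_alt words
instance (words : List String) (out : List (List String)) : Decidable (Spec_get_unacceptable words out) := by unfold Spec_get_unacceptable; infer_instance

-- ===== CLAIM (what is proved, stated in full; the proofs are below) =====
def Claim_equal_get_unacceptable : Prop := ∀ (words : List String), Dom_get_unacceptable words → Spec_get_unacceptable words (get_unacceptable words)

-- ===== LEMMAS AND PROOFS =====

-- the list of adjacent swaps a word generates, in A's generation order
def pvSwaps (w : String) : List String :=
  (PySem.List.pyRange 0 (PySem.Str.len w - 1)).map (pvSwapA w)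

theorem pv_lastGet {α : Type} (xs : List α) (x d : α) :
    (PySem.List.pyGet? (xs ++ [x]) (-1)).getD d = x := by
  simp [PySem.List.pyGet?, PySem.List.pyIdx?]

-- an adjacent swap preserves the length, so A's if-guard always holds
theorem pv_lenSwap (w : String) (i : Int)
    (hi : i ∈ PySem.List.pyRange 0 (PySem.Str.len w - 1)) :
    PySem.Str.len (pvSwapA w i) = PySem.Str.len w := by
  obtain ⟨h0, h1⟩ := PySem.List.mem_pyRange_one.mp hi
  rw [PySem.Str.len_eq] at h1
  lift i to ℕ using h0 with j
  have hj : j + 1 < w.toList.length := by omega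
  rw [PySem.Str.len_eq, PySem.Str.len_eq]
  simp only [pvSwapA, String.toList_ofList]
  rw [PySem.List.slice_to_natCast,
    show (j : Int) + 2 = ((j + 2 : Nat) : Int) by push_cast; ring,
    PySem.List.slice_from_natCast]
  simp only [List.length_append, List.length_take, List.length_drop,
    List.length_cons, List.length_nil]
  omega

theorem pv_A_inner (w : String) (uw : PySem.Set String) :
    (PySem.List.pyRange 0 (PySem.Str.len w - 1)).foldl (fun (uw : PySem.Set String) i =>
        let new_word := pvSwapA w i
        if PySem.Str.len new_word == PySem.Str.len w then PySem.Set.add uw new_word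
        else uw) uw = PySem.Set.update uw (pvSwaps w) := by
  rw [PySem.List.foldl_congr_mem _ _
    (fun (uw : PySem.Set String) i => PySem.Set.add uw (pvSwapA w i)) uw
    (by
      intro acc i hi
      simp only [pv_lenSwap w i hi, beq_self_eq_true, if_true])]
  rw [pvSwaps, PySem.Set.update_map_eq_foldl_add]

-- A's outer loop adds every swap of every word of L
theorem pv_A_outer (L : List String) (uw : PySem.Set String) :
    L.foldl (fun (uw : PySem.Set String) word =>
      (PySem.List.pyRange 0 (PySem.Str.len word - 1)).foldl (fun (uw : PySem.Set String) i =>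
        let new_word := pvSwapA word i
        if PySem.Str.len new_word == PySem.Str.len word then PySem.Set.add uw new_word
        else uw) uw) uw = PySem.Set.update uw (L.flatMap pvSwaps) := by
  induction L generalizing uw with
  | nil => rfl
  | cons w L ih =>
    rw [List.foldl_cons, pv_A_inner, ih, List.flatMap_cons, PySem.Set.update_append]

theorem pv_union_ofList (C : PySem.Set String) (X : List String) :
    PySem.Set.union C (PySem.Set.ofList X) = PySem.Set.update C X := by
  show PySem.Set.update C (PySem.Set.ofList X) = _
  rw [PySem.Set.update_eq_append_filter, PySem.Set.update_eq_append_filter,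
    PySem.Set.ofList_ofList]

-- B's comprehension generates exactly A's swap list, in the same order
theorem pvSwapsB_eq (w : String) : pvSwapsB w = pvSwaps w := by
  rw [pvSwapsB, pvSwaps, PySem.List.slice_from_one]
  cases hn : w.toList.length with
  | zero =>
    rw [List.length_eq_zero_iff.mp hn]
    rw [PySem.Str.len_eq, hn]
    rfl
  | succ m =>
    rw [PySem.Str.len_eq, hn,
      show ((m + 1 : Nat) : Int) - 1 = (m : Int) by push_cast; ring,
      PySem.List.pyRange_zero_natCast]
    apply List.ext_getElem
    · simp [PySem.List.length_enumerate, List.length_zip, List.length_tail, hn]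
    · intro k hk _
      have hkm : k < m := by
        simpa [PySem.List.length_enumerate, List.length_zip, List.length_tail, hn] using hk
      have hk1 : k + 1 < w.toList.length := by omega
      have hkz : k < (w.toList.zip w.toList.tail).length := by
        simp [List.length_zip, List.length_tail, hn]; omega
      simp only [List.getElem_map, PySem.List.getElem_enumerate, List.getElem_zip,
        List.getElem_range]
      rw [pvSwapA]
      congr 1
      rw [show (0 : Int) + (k : Int) = ((k : Nat) : Int) by ring]
      rw [show ((k : Nat) : Int) + 1 = ((k + 1 : Nat) : Int) by push_cast; ring,
        PySem.List.pyGet?_natCast, PySem.List.pyGet?_natCast,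
        List.getElem?_eq_getElem hk1, List.getElem?_eq_getElem (by omega : k < w.toList.length)]
      simp [List.getElem_tail]

theorem pvSwapsB_funext : pvSwapsB = pvSwaps := funext pvSwapsB_eq

-- A's round value on (R ++ [C]) appends the update of C with all its swaps
theorem pv_stepA_eq (R : List (List String)) (C : PySem.Set String) (r : Int) :
    pvStepA (R ++ [C]) r = (R ++ [C]) ++ [PySem.Set.update C (C.flatMap pvSwaps)] := by
  unfold pvStepA
  simp only [pv_lastGet, pv_A_outer, PySem.Set.update_empty, pv_union_ofList]

-- A's fold over any round list equals B's recursion of the same depth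
theorem pv_loop (rounds : List Int) : ∀ (R : List (List String)) (C : PySem.Set String),
    rounds.foldl pvStepA (R ++ [C]) = R ++ pvGrow C rounds.length := by
  induction rounds with
  | nil => intro R C; rfl
  | cons r rs ih =>
    intro R C
    rw [List.foldl_cons, pv_stepA_eq, ih]
    rw [List.length_cons, pvGrow, pvSwapsB_funext, pv_union_ofList]
    rw [List.append_assoc]

-- ===== VERDICT (by name: the statement is the Claim_ definition above) =====
theorem get_unacceptable_spec : Claim_equal_get_unacceptable := by
  intro words _
  unfold Spec_get_unacceptable get_unacceptable get_unacceptable_alt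
  have h := pv_loop (PySem.List.pyRange 0 3) [] (PySem.Set.ofList words)
  simpa using h
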